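-- pv_equiv track=rewrite | github.com/codemod-com/codemod | apps/ai/evaluate/eval.py | extract_between_backticks
-- ===== SOURCE A (Python) =====
-- def extract_between_backticks(text, min_length=30):
--     results = []
--     start_index = None
--     escaped = False  # Flag to track if the previous character was a backslash
--
--     for i, char in enumerate(text):
--         if char == '\\':
--             escaped = True  # A backslash was encountered
--         elif char == '`' and not escaped:  # Check for a non-escaped backtick
--             if start_index is None:
--                 start_index = i + 1
--             else:
--                 content = text[start_index:i]
--                 if len(content) > min_length:
--                     results.append(content)
--                 start_index = None
--         else:
--             escaped = False  # Reset the escaped flag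
--
--     return results
-- ===== SOURCE B (Python) =====
-- def extract_between_backticks(text, min_length=30):
--     # index-table approach: collect positions of non-escaped backticks, then pair them up
--     positions = [i for i, c in enumerate(text) if c == '`' and (i == 0 or text[i - 1] != '\\')]
--     results = []
--     while len(positions) >= 2:
--         p, q = positions[0], positions[1]
--         content = text[p + 1:q]
--         if len(content) > min_length:
--             results.append(content)
--         positions = positions[2:]
--     return results
-- ===== Notes on version B (the rewrite author's own statement) =====
-- stated objective: alternative
-- what changed: Replaces the single stateful scan (escaped flag + pending start index) by two plain passes: first build the list of positions of non-escaped backticks, then consume that list in consecutive pairs, slicing the text between each pair.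
import Mathlib
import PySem

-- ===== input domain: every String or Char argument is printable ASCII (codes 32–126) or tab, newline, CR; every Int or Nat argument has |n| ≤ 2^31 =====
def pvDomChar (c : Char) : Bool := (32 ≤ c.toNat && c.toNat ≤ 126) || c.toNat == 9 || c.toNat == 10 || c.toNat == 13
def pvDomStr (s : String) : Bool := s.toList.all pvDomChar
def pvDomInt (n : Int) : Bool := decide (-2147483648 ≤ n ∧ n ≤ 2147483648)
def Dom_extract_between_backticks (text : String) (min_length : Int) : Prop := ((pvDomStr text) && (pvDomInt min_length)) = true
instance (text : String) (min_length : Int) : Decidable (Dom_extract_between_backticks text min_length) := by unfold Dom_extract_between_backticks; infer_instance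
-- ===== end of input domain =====

-- B replaces A's single stateful scan (escaped flag + pending start index) by a position table of
-- non-escaped backticks consumed in consecutive pairs; same cost, a plainer decomposition.


-- ===== PORT A =====
-- one fold over enumerate(text) with state (results, start_index, escaped), exactly A's branches
def pvStepA (text : String) (min_length : Int)
    (s : List String × Option Int × Bool) (p : Int × Char) : List String × Option Int × Bool :=
  let results := s.1
  let start_index := s.2.1
  let escaped := s.2.2
  if p.2 = '\\' then (results, start_index, true)
  else if p.2 = '`' ∧ escaped = false then
    match start_index with
    | none => (results, some (p.1 + 1), escaped)
    | some st =>
        let content := PySem.Str.slice text (some st) (some p.1)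
        ((if PySem.Str.len content > min_length then results ++ [content] else results), none, escaped)
  else (results, start_index, false)

def extract_between_backticks (text : String) (min_length : Int) : List String :=
  ((PySem.List.enumerate text.toList 0).foldl (pvStepA text min_length) ([], none, false)).1

-- ===== PORT B =====
-- the while-loop of Source B: consume the position list two at a time
def pvPairLoop (text : String) (min_length : Int) : List Int → List String → List String
  | p :: q :: rest, results =>
      let content := PySem.Str.slice text (some (p + 1)) (some q)
      pvPairLoop text min_length rest
        (if PySem.Str.len content > min_length then results ++ [content] else results)
  | _, results => results

def extract_between_backticks_alt (text : String) (min_length : Int) : List String :=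
  let positions := ((PySem.List.enumerate text.toList 0).filter
    (fun p => p.2 == '`' && (p.1 == 0 || !(PySem.Str.pyGet? text (p.1 - 1) == some '\\')))).map (·.1)
  pvPairLoop text min_length positions []

-- ===== PRECONDITION & SPEC =====
def Spec_extract_between_backticks (text : String) (min_length : Int) (out : List String) : Prop := out = extract_between_backticks_alt text min_length
instance (text : String) (min_length : Int) (out : List String) : Decidable (Spec_extract_between_backticks text min_length out) := by unfold Spec_extract_between_backticks; infer_instance

-- ===== CLAIM (what is proved, stated in full; the proofs are below) =====
def Claim_equal_extract_between_backticks : Prop := ∀ (text : String) (min_length : Int), Dom_extract_between_backticks text min_length → Spec_extract_between_backticks text min_length (extract_between_backticks text min_length)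

-- ===== LEMMAS AND PROOFS =====

-- positions of non-escaped backticks in the suffix r starting at index i, with escaped flag e
def pvPosFrom : List Char → Int → Bool → List Int
  | [], _, _ => []
  | c :: r, i, e =>
      if c = '\\' then pvPosFrom r (i + 1) true
      else if c = '`' ∧ e = false then i :: pvPosFrom r (i + 1) false
      else pvPosFrom r (i + 1) false

-- pairing a position list, no accumulator
def pvPairOut (text : String) (min_length : Int) : List Int → List String
  | p :: q :: rest =>
      (if PySem.Str.len (PySem.Str.slice text (some (p + 1)) (some q)) > min_length
        then [PySem.Str.slice text (some (p + 1)) (some q)] else []) ++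
      pvPairOut text min_length rest
  | _ => []

-- what A's fold yields from a state with a pending (or no) start index
def pvTailOut (text : String) (min_length : Int) : Option Int → List Int → List String
  | none, ps => pvPairOut text min_length ps
  | some _, [] => []
  | some st, q :: rest =>
      (if PySem.Str.len (PySem.Str.slice text (some st) (some q)) > min_length
        then [PySem.Str.slice text (some st) (some q)] else []) ++
      pvPairOut text min_length rest

lemma pvPairOut_cons (text : String) (m : Int) (p : Int) (ps : List Int) :
    pvPairOut text m (p :: ps) = pvTailOut text m (some (p + 1)) ps := by
  cases ps <;> rfl

lemma pvScanA (text : String) (m : Int) :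
    ∀ (r : List Char) (i : Int) (res : List String) (st : Option Int) (e : Bool),
      ((PySem.List.enumerate r i).foldl (pvStepA text m) (res, st, e)).1 =
        res ++ pvTailOut text m st (pvPosFrom r i e) := by
  intro r
  induction r with
  | nil =>
      intro i res st e
      cases st <;> simp [PySem.List.enumerate, pvPosFrom, pvTailOut, pvPairOut]
  | cons c r ih =>
      intro i res st e
      rw [PySem.List.enumerate_cons, List.foldl_cons]
      by_cases hb : c = '\\'
      · have hstep : pvStepA text m (res, st, e) (i, c) = (res, st, true) := by
          simp [pvStepA, hb]
        rw [hstep, ih, pvPosFrom, if_pos hb]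
      · by_cases ht : c = '`' ∧ e = false
        · obtain ⟨hc, he⟩ := ht
          subst he
          cases st with
          | none =>
              have hstep : pvStepA text m (res, none, false) (i, c) = (res, some (i + 1), false) := by
                simp [pvStepA, hc]
              have hcond : c = '`' ∧ (false : Bool) = false := ⟨hc, rfl⟩
              rw [hstep, ih, pvPosFrom, if_neg hb, if_pos hcond]
              rw [show pvTailOut text m none (i :: pvPosFrom r (i + 1) false)
                    = pvPairOut text m (i :: pvPosFrom r (i + 1) false) from rfl,
                  pvPairOut_cons]
          | some s =>
              have hstep : pvStepA text m (res, some s, false) (i, c) =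
                  ((if PySem.Str.len (PySem.Str.slice text (some s) (some i)) > m
                      then res ++ [PySem.Str.slice text (some s) (some i)] else res), none, false) := by
                simp [pvStepA, hc]
              have hcond : c = '`' ∧ (false : Bool) = false := ⟨hc, rfl⟩
              rw [hstep, ih, pvPosFrom, if_neg hb, if_pos hcond]
              rw [show pvTailOut text m (some s) (i :: pvPosFrom r (i + 1) false)
                    = (if PySem.Str.len (PySem.Str.slice text (some s) (some i)) > m
                        then [PySem.Str.slice text (some s) (some i)] else []) ++
                      pvPairOut text m (pvPosFrom r (i + 1) false) from rfl]
              by_cases hl : PySem.Str.len (PySem.Str.slice text (some s) (some i)) > m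
              · rw [if_pos hl, if_pos hl, List.append_assoc]; rfl
              · rw [if_neg hl, if_neg hl, List.nil_append]; rfl
        · have hstep : pvStepA text m (res, st, e) (i, c) = (res, st, false) := by
            simp [pvStepA, hb, ht]
          rw [hstep, ih, pvPosFrom, if_neg hb, if_neg ht]

lemma pvPairLoopAcc (text : String) (m : Int) (ps : List Int) (res : List String) :
    pvPairLoop text m ps res = res ++ pvPairOut text m ps := by
  fun_induction pvPairLoop text m ps res with
  | case1 p q rest res content ih =>
      show pvPairLoop text m rest
          (if PySem.Str.len (PySem.Str.slice text (some (p + 1)) (some q)) > m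
            then res ++ [PySem.Str.slice text (some (p + 1)) (some q)] else res) = _
      rw [show (if PySem.Str.len content > m then res ++ [content] else res)
            = (if PySem.Str.len (PySem.Str.slice text (some (p + 1)) (some q)) > m
                then res ++ [PySem.Str.slice text (some (p + 1)) (some q)] else res) from rfl] at ih
      rw [pvPairOut]
      by_cases hl : PySem.Str.len (PySem.Str.slice text (some (p + 1)) (some q)) > m
      · rw [if_pos hl] at ih ⊢
        rw [ih, List.append_assoc, if_pos hl]
      · rw [if_neg hl] at ih ⊢
        rw [ih, if_neg hl, List.nil_append]
  | case2 ps res h =>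
      match ps with
      | [] => simp [pvPairOut]
      | [p] => simp [pvPairOut]
      | p :: q :: rest => exact absurd rfl (h p q rest)

lemma pvPosEq (text : String) :
    ∀ (r : List Char) (i : Nat) (e : Bool),
      text.toList.drop i = r →
      (e = true ↔ (0 < i ∧ text.toList[i-1]? = some '\\')) →
      (((PySem.List.enumerate r (i : Int)).filter
        (fun p => p.2 == '`' && (p.1 == 0 || !(PySem.Str.pyGet? text (p.1 - 1) == some '\\')))).map (·.1))
        = pvPosFrom r (i : Int) e := by
  intro r
  induction r with
  | nil => intro i e _ _; simp [PySem.List.enumerate, pvPosFrom]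
  | cons c r ih =>
      intro i e hdrop hiff
      have hget : text.toList[i]? = some c := by
        have := (List.getElem?_drop (xs := text.toList) (i := i) (j := 0)).symm
        simp [hdrop] at this; simpa using this
      have hdrop' : text.toList.drop (i + 1) = r := by
        rw [← List.drop_drop, hdrop]; rfl
      have hcast : (i : Int) + 1 = ((i + 1 : Nat) : Int) := by push_cast; ring
      rw [PySem.List.enumerate_cons, List.filter_cons]
      dsimp only
      rw [pvPosFrom]
      by_cases hb : c = '\\'
      · subst hb
        have hpred : ((('\\' : Char) == '`') &&
            (((i : Int)) == 0 || !(PySem.Str.pyGet? text ((i : Int) - 1) == some '\\'))) = false := by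
          simp
        rw [if_pos rfl, hpred, if_neg (by decide : ¬ (false = true)), hcast,
          ih (i + 1) true hdrop' (by simp [hget])]
      · by_cases hc : c = '`'
        · subst hc
          have hiffnext : ((false : Bool) = true) ↔ (0 < i + 1 ∧ text.toList[i+1-1]? = some '\\') := by
            simp [hget]
          cases e with
          | false =>
              have hpred : ((('`' : Char) == '`') &&
                  (((i : Int)) == 0 || !(PySem.Str.pyGet? text ((i : Int) - 1) == some '\\'))) = true := by
                simp only [BEq.rfl, Bool.true_and, Bool.or_eq_true, beq_iff_eq, Bool.not_eq_true',
                  beq_eq_false_iff_ne, ne_eq]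
                by_cases hi0 : i = 0
                · subst hi0; left; rfl
                · right
                  intro hcontra
                  have hipos : 0 < i := Nat.pos_of_ne_zero hi0
                  have hm1 : (i : Int) - 1 = ((i - 1 : Nat) : Int) := by omega
                  rw [PySem.Str.pyGet?_eq] at hcontra
                  simp only [PySem.Chars.pyGet?_eq_listPyGet?] at hcontra
                  rw [hm1, PySem.List.pyGet?_natCast] at hcontra
                  exact absurd (hiff.mpr ⟨hipos, hcontra⟩) (by simp)
              have hcond : ('`' : Char) = '`' ∧ (false : Bool) = false := ⟨rfl, rfl⟩
              rw [if_neg hb, if_pos hcond, hpred, if_pos rfl, List.map_cons, hcast,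
                ih (i + 1) false hdrop' hiffnext]
          | true =>
              obtain ⟨hipos, hprev⟩ := hiff.mp rfl
              have hpred : ((('`' : Char) == '`') &&
                  (((i : Int)) == 0 || !(PySem.Str.pyGet? text ((i : Int) - 1) == some '\\'))) = false := by
                have hine : ((i : Int) == 0) = false := by simp; omega
                have hm1 : (i : Int) - 1 = ((i - 1 : Nat) : Int) := by omega
                rw [PySem.Str.pyGet?_eq]
                simp only [PySem.Chars.pyGet?_eq_listPyGet?]
                rw [hm1, PySem.List.pyGet?_natCast]
                simp [hine, hprev]
              have hnot : ¬ (('`' : Char) = '`' ∧ (true : Bool) = false) := by simp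
              rw [if_neg hb, if_neg hnot, hpred, if_neg (by decide : ¬ (false = true)), hcast,
                ih (i + 1) false hdrop' (by simp [hget])]
        · have hpred : ((c == '`') &&
              (((i : Int)) == 0 || !(PySem.Str.pyGet? text ((i : Int) - 1) == some '\\'))) = false := by
            simp [hc]
          have hnot : ¬ (c = '`' ∧ e = false) := fun h => hc h.1
          rw [if_neg hb, if_neg hnot, hpred, if_neg (by decide : ¬ (false = true)), hcast,
            ih (i + 1) false hdrop' (by simp [hget, hb])]

-- ===== VERDICT (by name: the statement is the Claim_ definition above) =====
theorem extract_between_backticks_spec : Claim_equal_extract_between_backticks := by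
  intro text m _
  unfold Spec_extract_between_backticks extract_between_backticks extract_between_backticks_alt
  rw [pvScanA, pvPairLoopAcc]
  have hpos := pvPosEq text text.toList 0 false (by simp) (by simp)
  simp only [Nat.cast_zero] at hpos
  rw [hpos]
  rfl
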